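-- pv_equiv track=rewrite | github.com/ericmerle3789/Collatz-Junction-Theorem | syracuse_jepa/pipeline/vandermonde_approach.py | find_polynomial_roots
-- ===== SOURCE A (Python) =====
-- def find_polynomial_roots(coeffs, d):
--     """Find all roots of Σ coeffs[i] · X^i mod d (brute force for small d)."""
--     if d > 10000: return None  # Too large
--     roots = []
--     for x in range(d):
--         val = sum(c * pow(x, i, d) for i, c in enumerate(coeffs)) % d
--         if val == 0:
--             roots.append(x)
--     return roots
-- ===== SOURCE B (Python) =====
-- def find_polynomial_roots(coeffs, d):
--     """Find all roots of Σ coeffs[i] · X^i mod d (brute force for small d)."""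
--     if d > 10000:
--         return None  # Too large
--     return [x for x in range(d) if horner_mod(coeffs, x, d) == 0]
--
--
-- def horner_mod(coeffs, x, d):
--     """Evaluate the polynomial at x by Horner's rule, reduced mod d each step."""
--     acc = 0
--     for c in reversed(coeffs):
--         acc = (acc * x + c) % d
--     return acc
-- ===== Notes on version B (the rewrite author's own statement) =====
-- stated objective: alternative
-- what changed: B filters range(d) by a Horner-rule evaluation reduced mod d at each step, instead of A's accumulator loop that sums c*pow(x,i,d) over enumerate(coeffs) per candidate and appends to a list.
import Mathlib
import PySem

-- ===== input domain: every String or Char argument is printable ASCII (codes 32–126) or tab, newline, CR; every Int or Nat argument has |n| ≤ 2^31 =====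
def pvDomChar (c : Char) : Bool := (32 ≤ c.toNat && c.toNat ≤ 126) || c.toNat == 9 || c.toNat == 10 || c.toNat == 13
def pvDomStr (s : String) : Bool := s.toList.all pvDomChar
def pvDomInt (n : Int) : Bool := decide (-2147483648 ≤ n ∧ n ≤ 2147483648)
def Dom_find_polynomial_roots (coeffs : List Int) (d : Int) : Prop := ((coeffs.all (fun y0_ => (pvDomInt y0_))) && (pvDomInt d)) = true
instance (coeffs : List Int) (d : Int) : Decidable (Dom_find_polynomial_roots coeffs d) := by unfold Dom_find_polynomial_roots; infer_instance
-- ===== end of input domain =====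

-- B filters range(d) by a recursive Horner evaluation reduced mod d per step, instead of A's
-- accumulator loop summing c*pow(x,i,d) per term; same return value everywhere (both total).

-- ===== PORT A =====
-- pow(x, i, d): exact for the calls A makes (i ≥ 0 from enumerate, d > 0 inside the loop)
def pyPow3 (x i d : Int) : Int := PySem.Int.mod (x ^ i.toNat) d

def find_polynomial_roots (coeffs : List Int) (d : Int) : Option (List Int) :=
  if d > 10000 then none
  else
    some ((PySem.List.pyRange 0 d 1).foldl (fun roots x =>
      let val := PySem.Int.mod
        ((PySem.List.enumerate coeffs 0).foldl
          (fun s ic => s + ic.2 * pyPow3 x ic.1 d) 0) d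
      if val = 0 then roots ++ [x] else roots) [])

-- ===== PORT B =====
def horner_mod (coeffs : List Int) (x d : Int) : Int :=
  coeffs.reverse.foldl (fun acc c => PySem.Int.mod (acc * x + c) d) 0

def find_polynomial_roots_alt (coeffs : List Int) (d : Int) : Option (List Int) :=
  if d > 10000 then none
  else some ((PySem.List.pyRange 0 d 1).filter (fun x => horner_mod coeffs x d == 0))

-- ===== PRECONDITION & SPEC =====
def Spec_find_polynomial_roots (coeffs : List Int) (d : Int) (out : Option (List Int)) : Prop := out = find_polynomial_roots_alt coeffs d
instance (coeffs : List Int) (d : Int) (out : Option (List Int)) : Decidable (Spec_find_polynomial_roots coeffs d out) := by unfold Spec_find_polynomial_roots; infer_instance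

-- ===== CLAIM (what is proved, stated in full; the proofs are below) =====
def Claim_equal_find_polynomial_roots : Prop := ∀ (coeffs : List Int) (d : Int), Dom_find_polynomial_roots coeffs d → Spec_find_polynomial_roots coeffs d (find_polynomial_roots coeffs d)

-- ===== LEMMAS AND PROOFS =====

/-- The polynomial Σ cs[i]·x^i, written recursively. -/
def pvPoly (x : Int) : List Int → Int
  | [] => 0
  | c :: cs => c + x * pvPoly x cs

/-- B's Horner evaluation (fold over the reversed coefficients) computes pvPoly mod d. -/
theorem horner_mod_eq (x d : Int) (hd : 0 < d) (cs : List Int) :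
    horner_mod cs x d = pvPoly x cs % d := by
  unfold horner_mod
  rw [List.foldl_reverse]
  induction cs with
  | nil => simp [pvPoly]
  | cons c cs ih =>
    rw [List.foldr_cons, ih, PySem.Int.mod_eq_emod_of_pos hd]
    show ((pvPoly x cs % d) * x + c) % d = pvPoly x (c :: cs) % d
    rw [show pvPoly x (c :: cs) = c + x * pvPoly x cs from rfl]
    have h1 : (pvPoly x cs % d) ≡ pvPoly x cs [ZMOD d] :=
      (Int.emod_emod_of_dvd _ dvd_rfl : (pvPoly x cs % d) % d = pvPoly x cs % d)
    have h2 : (pvPoly x cs % d) * x + c ≡ pvPoly x cs * x + c [ZMOD d] :=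
      (h1.mul_right x).add_right c
    calc ((pvPoly x cs % d) * x + c) % d = (pvPoly x cs * x + c) % d := h2
      _ = (c + x * pvPoly x cs) % d := by ring_nf

/-- A's generator-sum over `enumerate`, taken mod d, also equals pvPoly mod d. -/
theorem enumsum_eq (x d : Int) (hd : 0 < d) :
    ∀ (cs : List Int) (s : Nat) (init : Int),
      ((PySem.List.enumerate cs (s : Int)).foldl
        (fun a ic => a + ic.2 * pyPow3 x ic.1 d) init) % d
      = (init + x ^ s * pvPoly x cs) % d := by
  intro cs
  induction cs with
  | nil => intro s init; simp [PySem.List.enumerate_nil, pvPoly]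
  | cons c cs ih =>
    intro s init
    rw [PySem.List.enumerate_cons]
    simp only [List.foldl_cons]
    have hcast : ((s : Int) + 1) = ((s + 1 : Nat) : Int) := by push_cast; ring
    rw [hcast, ih (s + 1)]
    simp only [pyPow3, PySem.Int.mod_eq_emod_of_pos hd, Int.toNat_natCast, pvPoly]
    have key : init + c * (x ^ s % d) + x ^ (s + 1) * pvPoly x cs
        ≡ init + c * x ^ s + x ^ (s + 1) * pvPoly x cs [ZMOD d] :=
      have hp : (x ^ s % d) ≡ x ^ s [ZMOD d] :=
        (Int.emod_emod_of_dvd _ dvd_rfl : (x ^ s % d) % d = x ^ s % d)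
      ((hp.mul_left c).add_left init).add_right _
    calc (init + c * (x ^ s % d) + x ^ (s + 1) * pvPoly x cs) % d
        = (init + c * x ^ s + x ^ (s + 1) * pvPoly x cs) % d := key
      _ = (init + x ^ s * (c + x * pvPoly x cs)) % d := by ring_nf

-- ===== VERDICT (by name: the statement is the Claim_ definition above) =====
theorem find_polynomial_roots_spec : Claim_equal_find_polynomial_roots := by
  intro coeffs d _
  unfold Spec_find_polynomial_roots find_polynomial_roots find_polynomial_roots_alt
  by_cases hgt : d > 10000
  · simp [hgt]
  · simp only [hgt, if_false]
    by_cases hd : 0 < d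
    · congr 1
      rw [PySem.List.foldl_append_ite_eq_filter]
      simp only [List.nil_append]
      apply List.filter_congr
      intro x _
      have hA : PySem.Int.mod
          ((PySem.List.enumerate coeffs 0).foldl
            (fun s ic => s + ic.2 * pyPow3 x ic.1 d) 0) d
          = horner_mod coeffs x d := by
        rw [horner_mod_eq x d hd, PySem.Int.mod_eq_emod_of_pos hd]
        have := enumsum_eq x d hd coeffs 0 0
        simpa using this
      rw [hA]; cases h : horner_mod coeffs x d == 0 <;> simp_all
    · rw [PySem.List.pyRange_one_eq_nil (by omega)]
      rfl
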